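-- pv_equiv track=rewrite | github.com/ChangRyeol/datamining2 | class/02_end_to_end_machine_learning_project.py | crash_cours
-- ===== SOURCE A (Python) =====
-- def crash_cours(dltr):
--   result = 0
--   temp = 1
--   for i in range(1,dltr):
--     temp = temp * i
--     for k in range(i):
--       result += temp
--   return result
-- ===== SOURCE B (Python) =====
-- def crash_cours(dltr):
--     # closed form: sum_{i=1}^{dltr-1} i * i! = dltr! - 1 (and 0 when the loop is empty)
--     if dltr < 2:
--         return 0
--     f = 1
--     for i in range(2, dltr + 1):
--         f *= i
--     return f - 1
-- ===== Notes on version B (the rewrite author's own statement) =====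
-- stated objective: faster
-- what changed: Replaces the nested loops (inner loop adds temp i times) by the closed form sum_{i<dltr} i*i! = dltr!-1, computed with a single factorial loop.
import Mathlib
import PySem

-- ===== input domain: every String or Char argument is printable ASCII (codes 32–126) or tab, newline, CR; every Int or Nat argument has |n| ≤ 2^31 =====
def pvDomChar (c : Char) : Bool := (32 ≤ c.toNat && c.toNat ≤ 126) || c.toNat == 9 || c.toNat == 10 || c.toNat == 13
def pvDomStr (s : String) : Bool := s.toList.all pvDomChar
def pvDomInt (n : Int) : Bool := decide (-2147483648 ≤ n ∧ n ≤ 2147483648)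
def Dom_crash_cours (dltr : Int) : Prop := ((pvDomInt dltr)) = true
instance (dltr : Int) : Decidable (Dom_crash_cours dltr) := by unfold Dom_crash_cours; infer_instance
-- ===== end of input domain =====

-- B replaces A's quadratic nested loops by the closed form dltr! - 1 (one factorial loop): faster.

-- ===== PORT A =====
def crash_cours (dltr : Int) : Int :=
  let s := (PySem.List.pyRange 1 dltr 1).foldl
    (fun (st : Int × Int) i =>
      let temp := st.2 * i
      let result := (PySem.List.pyRange 0 i 1).foldl (fun r _ => r + temp) st.1
      (result, temp)) (0, 1)
  s.1

-- ===== PORT B =====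
def crash_cours_alt (dltr : Int) : Int :=
  if dltr < 2 then 0
  else ((PySem.List.pyRange 2 (dltr + 1) 1).foldl (fun f i => f * i) 1) - 1

-- ===== PRECONDITION & SPEC =====
def Spec_crash_cours (dltr : Int) (out : Int) : Prop := out = crash_cours_alt dltr
instance (dltr : Int) (out : Int) : Decidable (Spec_crash_cours dltr out) := by unfold Spec_crash_cours; infer_instance

-- ===== CLAIM (what is proved, stated in full; the proofs are below) =====
def Claim_equal_crash_cours : Prop := ∀ (dltr : Int), Dom_crash_cours dltr → Spec_crash_cours dltr (crash_cours dltr)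

-- ===== LEMMAS AND PROOFS =====

-- constant-add fold = length * t
theorem foldl_const_add (l : List Int) (t r : Int) :
    l.foldl (fun r _ => r + t) r = r + l.length * t := by
  induction l generalizing r with
  | nil => simp
  | cons x xs ih => simp [List.foldl, ih]; ring

theorem inner_loop (i t r : Int) (h : 0 ≤ i) :
    (PySem.List.pyRange 0 i 1).foldl (fun r _ => r + t) r = r + i * t := by
  rw [foldl_const_add, PySem.List.length_pyRange_one]
  have : ((i - 0).toNat : Int) = i := by omega
  rw [this]

def stepA : Int × Int → Int → Int × Int := fun st i =>
  let temp := st.2 * i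
  let result := (PySem.List.pyRange 0 i 1).foldl (fun r _ => r + temp) st.1
  (result, temp)

theorem mainA (n : Nat) :
    (PySem.List.pyRange 1 ((n : Int) + 1) 1).foldl stepA (0, 1)
      = ((Nat.factorial (n + 1) : Int) - 1, (Nat.factorial n : Int)) := by
  induction n with
  | zero => simp [PySem.List.pyRange_one_eq_nil, Nat.factorial]
  | succ m ih =>
    have hsplit : PySem.List.pyRange 1 ((m : Int) + 1 + 1) 1
        = PySem.List.pyRange 1 ((m : Int) + 1) 1 ++ [(m : Int) + 1] := by
      exact PySem.List.pyRange_one_succ_right (by omega)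
    have : ((m : Int) + 1 + 1) = (((m + 1 : Nat) : Int) + 1) := by push_cast; ring
    rw [← this, hsplit, List.foldl_append, ih]
    show stepA _ _ = _
    unfold stepA
    simp only []
    rw [inner_loop _ _ _ (by omega)]
    simp only [Prod.mk.injEq]
    refine ⟨?_, ?_⟩ <;> (push_cast [Nat.factorial_succ]; ring)

theorem mainB (n : Nat) :
    (PySem.List.pyRange 2 ((n : Int) + 2) 1).foldl (fun f i => f * i) 1
      = (Nat.factorial (n + 1) : Int) := by
  induction n with
  | zero => simp [PySem.List.pyRange_one_eq_nil, Nat.factorial]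
  | succ m ih =>
    have hsplit : PySem.List.pyRange 2 ((m : Int) + 2 + 1) 1
        = PySem.List.pyRange 2 ((m : Int) + 2) 1 ++ [(m : Int) + 2] := by
      exact PySem.List.pyRange_one_succ_right (by omega)
    have hc : (((m + 1 : Nat) : Int) + 2) = ((m : Int) + 2 + 1) := by push_cast; ring
    rw [hc, hsplit, List.foldl_append, ih]
    simp only [List.foldl]
    push_cast [Nat.factorial_succ]; ring

-- ===== VERDICT (by name: the statement is the Claim_ definition above) =====
theorem crash_cours_spec : Claim_equal_crash_cours := by
  intro dltr _
  unfold Spec_crash_cours crash_cours crash_cours_alt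
  by_cases h : dltr < 2
  · rw [PySem.List.pyRange_one_eq_nil (by omega)]
    simp [h]
  · push Not at h
    set n := (dltr - 2).toNat with hn
    have hd : dltr = (n : Int) + 2 := by omega
    rw [hd, if_neg (by omega)]
    show ((PySem.List.pyRange 1 ((n : Int) + 2) 1).foldl stepA (0, 1)).1 = _
    rw [show PySem.List.pyRange 1 ((n : Int) + 2) 1
          = PySem.List.pyRange 1 (((n + 1 : Nat) : Int) + 1) 1 from by
        rw [show ((n : Int) + 2) = (((n + 1 : Nat) : Int) + 1) from by push_cast; ring],
      show PySem.List.pyRange 2 ((n : Int) + 2 + 1) 1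
          = PySem.List.pyRange 2 (((n + 1 : Nat) : Int) + 2) 1 from by
        rw [show ((n : Int) + 2 + 1) = (((n + 1 : Nat) : Int) + 2) from by push_cast; ring],
      mainA (n + 1), mainB (n + 1)]
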